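-- pv_equiv track=rewrite | github.com/NgrimaldiN/anki-addon-html-to-card | addon/parser.py | _strip_json_comments
-- ===== SOURCE A (Python) =====
-- def _strip_json_comments(text: str) -> str:
--     result: list[str] = []
--     in_string = False
--     escaped = False
--     in_line_comment = False
--     in_block_comment = False
--     index = 0
--
--     while index < len(text):
--         char = text[index]
--         next_char = text[index + 1] if index + 1 < len(text) else ""
--
--         if in_line_comment:
--             if char == "\n":
--                 in_line_comment = False
--                 result.append(char)
--             index += 1
--             continue
--
--         if in_block_comment:
--             if char == "*" and next_char == "/":
--                 in_block_comment = False
--                 index += 2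
--             else:
--                 if char == "\n":
--                     result.append(char)
--                 index += 1
--             continue
--
--         if in_string:
--             result.append(char)
--             if escaped:
--                 escaped = False
--             elif char == "\\":
--                 escaped = True
--             elif char == '"':
--                 in_string = False
--             index += 1
--             continue
--
--         if char == '"':
--             in_string = True
--             result.append(char)
--             index += 1
--             continue
--
--         if char == "/" and next_char == "/":
--             in_line_comment = True
--             index += 2
--             continue
--
--         if char == "/" and next_char == "*":
--             in_block_comment = True
--             index += 2
--             continue
--
--         result.append(char)
--         index += 1
--
--     return "".join(result)
-- ===== SOURCE B (Python) =====
-- def _strip_json_comments(text: str) -> str: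
--     # Token-level scanner: consume whole string literals / comments at once
--     # instead of a per-character FSM with boolean flags.
--     out = []
--     i, n = 0, len(text)
--     while i < n:
--         c = text[i]
--         if c == '"':
--             j = i + 1
--             while j < n:
--                 if text[j] == '\\':
--                     j += 2
--                 elif text[j] == '"':
--                     j += 1
--                     break
--                 else:
--                     j += 1
--             out.append(text[i:j])
--             i = j
--         elif text.startswith('//', i):
--             k = text.find('\n', i)
--             i = n if k == -1 else k  # the newline itself is copied next iteration
--         elif text.startswith('/*', i):
--             k = text.find('*/', i + 2)
--             end = n if k == -1 else k
--             out.append('\n' * text.count('\n', i, end))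
--             i = n if k == -1 else k + 2
--         else:
--             out.append(c)
--             i += 1
--     return ''.join(out)
-- ===== Notes on version B (the rewrite author's own statement) =====
-- stated objective: simpler
-- what changed: Replaces A's per-character FSM with four boolean state flags by a token-level scanner that consumes a whole string literal, line comment or block comment in one step (emitting the literal verbatim, nothing for a line comment, and only the contained newlines for a block comment).
import Mathlib
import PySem

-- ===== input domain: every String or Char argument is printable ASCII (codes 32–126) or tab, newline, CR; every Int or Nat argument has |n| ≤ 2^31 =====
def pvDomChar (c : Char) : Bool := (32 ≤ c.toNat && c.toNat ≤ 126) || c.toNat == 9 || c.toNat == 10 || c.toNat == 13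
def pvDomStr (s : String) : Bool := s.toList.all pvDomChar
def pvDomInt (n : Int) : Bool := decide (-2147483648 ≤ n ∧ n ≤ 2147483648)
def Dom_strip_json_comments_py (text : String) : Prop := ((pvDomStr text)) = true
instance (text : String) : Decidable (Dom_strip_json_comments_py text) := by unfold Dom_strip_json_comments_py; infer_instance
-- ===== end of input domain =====

-- B replaces A's per-character FSM (in_string/escaped/in_line_comment/in_block_comment flags)
-- by a token-level scanner that consumes a whole string literal or comment at once (objective: simpler).

-- ===== PORT A =====
-- A's while loop: one step per character, state = the four boolean flags; skip-2 steps recurse on rest.tail.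
def stripA (text : List Char) (in_string escaped in_line_comment in_block_comment : Bool) : List Char :=
  match text with
  | [] => []
  | char :: rest =>
    let next_char : Option Char := rest.head?
    if in_line_comment then
      if char = '\n' then char :: stripA rest in_string escaped false in_block_comment
      else stripA rest in_string escaped in_line_comment in_block_comment
    else if in_block_comment then
      if char = '*' ∧ next_char = some '/' then stripA rest.tail in_string escaped in_line_comment false
      else if char = '\n' then char :: stripA rest in_string escaped in_line_comment in_block_comment
      else stripA rest in_string escaped in_line_comment in_block_comment
    else if in_string then
      char ::
        (if escaped then stripA rest in_string false in_line_comment in_block_comment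
         else if char = '\\' then stripA rest in_string true in_line_comment in_block_comment
         else if char = '"' then stripA rest false escaped in_line_comment in_block_comment
         else stripA rest in_string escaped in_line_comment in_block_comment)
    else if char = '"' then char :: stripA rest true escaped in_line_comment in_block_comment
    else if char = '/' ∧ next_char = some '/' then stripA rest.tail in_string escaped true in_block_comment
    else if char = '/' ∧ next_char = some '*' then stripA rest.tail in_string escaped in_line_comment true
    else char :: stripA rest in_string escaped in_line_comment in_block_comment
termination_by text.length
decreasing_by all_goals simp [List.length_tail]

def strip_json_comments_py (text : String) : String :=
  String.mk (stripA text.toList false false false false)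

-- ===== PORT B =====
-- consume the body of a string literal (after the opening quote): returns (emitted body, remainder)
def bStr : List Char → List Char × List Char
  | [] => ([], [])
  | '\\' :: rest =>
    match rest with
    | [] => (['\\'], [])
    | d :: rest' => ('\\' :: d :: (bStr rest').1, (bStr rest').2)
  | '"' :: rest => (['"'], rest)
  | c :: rest => (c :: (bStr rest).1, (bStr rest).2)

-- consume a block comment body up to '*/' or EOF: returns (its newlines, remainder)
def bBlock : List Char → List Char × List Char
  | [] => ([], [])
  | '*' :: '/' :: rest => ([], rest)
  | c :: rest => ((if c = '\n' then '\n' :: (bBlock rest).1 else (bBlock rest).1), (bBlock rest).2)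

theorem bStr_snd_le (cs : List Char) : (bStr cs).2.length ≤ cs.length := by
  fun_induction bStr cs <;> simp_all <;> omega

theorem bBlock_snd_le (cs : List Char) : (bBlock cs).2.length ≤ cs.length := by
  fun_induction bBlock cs <;> simp_all <;> omega

def bLoop : List Char → List Char
  | [] => []
  | '"' :: rest => '"' :: ((bStr rest).1 ++ bLoop (bStr rest).2)
  | '/' :: '/' :: rest => bLoop (rest.dropWhile (· ≠ '\n'))
  | '/' :: '*' :: rest => (bBlock rest).1 ++ bLoop (bBlock rest).2
  | c :: rest => c :: bLoop rest
termination_by cs => cs.length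
decreasing_by
  · have := bStr_snd_le rest; simp; omega
  · have := List.length_dropWhile_le (p := fun x : Char => !decide (x = '\n')) rest
    simp at this ⊢; omega
  · have := bBlock_snd_le rest; simp; omega
  · simp

def strip_json_comments_py_alt (text : String) : String :=
  String.mk (bLoop text.toList)

-- ===== PRECONDITION & SPEC =====
def Spec_strip_json_comments_py (text : String) (out : String) : Prop := out = strip_json_comments_py_alt text
instance (text : String) (out : String) : Decidable (Spec_strip_json_comments_py text out) := by unfold Spec_strip_json_comments_py; infer_instance

-- ===== CLAIM (what is proved, stated in full; the proofs are below) =====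
def Claim_equal_strip_json_comments_py : Prop := ∀ (text : String), Dom_strip_json_comments_py text → Spec_strip_json_comments_py text (strip_json_comments_py text)

-- ===== LEMMAS AND PROOFS =====

-- A in string mode (escaped = false) emits exactly the string body B consumes, then returns to main mode.
theorem stripA_string (cs : List Char) :
    stripA cs true false false false = (bStr cs).1 ++ stripA (bStr cs).2 false false false false := by
  fun_induction bStr cs with
  | case1 => simp [stripA]
  | case2 => simp [stripA]
  | case3 d rest' ih => simp [stripA, ih]
  | case4 rest => simp [stripA]
  | case5 c rest h1 h2 ih =>
    simp only [stripA, bStr]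
    rw [if_neg h1, if_neg h2, ih]
    simp

-- A in line-comment mode skips to the newline (kept) and continues in main mode.
theorem stripA_line (cs : List Char) :
    stripA cs false false true false
      = stripA (cs.dropWhile (fun x => !decide (x = '\n'))) false false false false := by
  induction cs with
  | nil => simp [stripA]
  | cons c rest ih =>
    by_cases h : c = '\n'
    · subst h; simp [stripA, List.dropWhile]
    · simp [stripA, h, List.dropWhile, ih]

-- A in block-comment mode emits exactly the newlines B collects, then returns to main mode.
theorem stripA_block (cs : List Char) :
    stripA cs false false false true = (bBlock cs).1 ++ stripA (bBlock cs).2 false false false false := by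
  fun_induction bBlock cs with
  | case1 => simp [stripA]
  | case2 rest => simp [stripA]
  | case3 c rest h ih =>
    have hne : ¬(c = '*' ∧ rest.head? = some '/') := by
      rintro ⟨rfl, hh⟩
      cases rest with
      | nil => simp at hh
      | cons r rs => simp at hh; subst hh; exact h rs rfl rfl
    by_cases hn : c = '\n'
    · subst hn; simp [stripA, ih]
    · simp [stripA, bBlock, hne, hn, ih]

theorem stripA_eq_bLoop (cs : List Char) :
    stripA cs false false false false = bLoop cs := by
  fun_induction bLoop cs with
  | case1 => simp [stripA]
  | case2 rest ih => simp [stripA, stripA_string, bLoop, ih]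
  | case3 rest ih =>
    have h := stripA_line rest
    simp only [ne_eq, decide_not] at ih
    simp [stripA, bLoop, h, ih]
  | case4 rest ih => simp [stripA, stripA_block, bLoop, ih]
  | case5 c rest h1 h2 h3 ih =>
    have hsl : ¬ (c = '/' ∧ rest.head? = some '/') := by
      rintro ⟨rfl, hh⟩
      cases rest with
      | nil => simp at hh
      | cons r rs => simp at hh; subst hh; exact h2 rs rfl rfl
    have hsb : ¬ (c = '/' ∧ rest.head? = some '*') := by
      rintro ⟨rfl, hh⟩
      cases rest with
      | nil => simp at hh
      | cons r rs => simp at hh; subst hh; exact h3 rs rfl rfl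
    simp [stripA, hsl, hsb, ih]
    intro hc; exact absurd hc h1

-- ===== VERDICT (by name: the statement is the Claim_ definition above) =====
theorem strip_json_comments_py_spec : Claim_equal_strip_json_comments_py := by
  intro text _
  unfold Spec_strip_json_comments_py strip_json_comments_py strip_json_comments_py_alt
  rw [stripA_eq_bLoop]
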